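-- pv_equiv track=rewrite | github.com/maanitg/containment | backend/agents/fire_simulation.py | _compute_perimeter
-- ===== SOURCE A (Python) =====
-- def _compute_perimeter(burning_cells: list) -> list:
--     if not burning_cells:
--         return []
--
--     xs = [c[0] for c in burning_cells]
--     ys = [c[1] for c in burning_cells]
--
--     min_x, max_x = min(xs), max(xs)
--     min_y, max_y = min(ys), max(ys)
--
--     top = []
--     bottom = []
--     for x in range(min_x, max_x + 1):
--         ys_at_x = [c[1] for c in burning_cells if c[0] == x]
--         if ys_at_x:
--             top.append([x, min(ys_at_x)])
--             bottom.append([x, max(ys_at_x)])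
--
--     bottom.reverse()
--     perimeter = top + bottom
--
--     if perimeter and perimeter[0] != perimeter[-1]:
--         perimeter.append(perimeter[0])
--
--     return perimeter
-- ===== SOURCE B (Python) =====
-- def _compute_perimeter(burning_cells: list) -> list:
--     if not burning_cells:
--         return []
--
--     # sort once by x, then sweep the sorted list grouping consecutive
--     # runs of equal x: each run yields its min-y (top) and max-y (bottom)
--     pts = sorted(((c[0], c[1]) for c in burning_cells), key=lambda p: p[0])
--
--     top = []
--     bottom = []
--     i, n = 0, len(pts)
--     while i < n:
--         x = pts[i][0]
--         lo = hi = pts[i][1]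
--         j = i + 1
--         while j < n and pts[j][0] == x:
--             y = pts[j][1]
--             if y < lo:
--                 lo = y
--             if y > hi:
--                 hi = y
--             j += 1
--         top.append([x, lo])
--         bottom.append([x, hi])
--         i = j
--
--     perimeter = top + bottom[::-1]
--     if perimeter[0] != perimeter[-1]:
--         perimeter.append(perimeter[0])
--     return perimeter
-- ===== Notes on version B (the rewrite author's own statement) =====
-- stated objective: faster
-- what changed: Replaces A's per-column rescan of the whole cell list for every x in range(min_x, max_x+1) by sort-once-then-sweep: the cells are sorted by x and a single pass groups consecutive runs of equal x into their (min_y, max_y) vertices.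
import Mathlib
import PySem

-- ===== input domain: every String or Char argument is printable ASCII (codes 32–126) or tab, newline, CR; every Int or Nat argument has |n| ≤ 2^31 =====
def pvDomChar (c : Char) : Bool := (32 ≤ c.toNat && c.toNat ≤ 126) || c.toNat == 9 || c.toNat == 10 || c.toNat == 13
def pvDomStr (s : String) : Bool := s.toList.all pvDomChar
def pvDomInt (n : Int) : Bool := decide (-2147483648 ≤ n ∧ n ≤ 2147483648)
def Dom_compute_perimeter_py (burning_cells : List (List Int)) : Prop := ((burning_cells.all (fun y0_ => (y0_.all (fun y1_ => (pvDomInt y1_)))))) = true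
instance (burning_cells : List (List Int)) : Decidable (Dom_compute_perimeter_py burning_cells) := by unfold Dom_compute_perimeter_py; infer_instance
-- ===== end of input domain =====

-- B sorts the cells by x once and sweeps the sorted list, grouping consecutive runs of equal x
-- into (min-y, max-y), instead of A's rescan of the whole cell list for every x of the range;
-- objective: faster (O(W*N) -> O(N log N)).

-- c[0] / c[1]; exact under Pre_ (every cell has length ≥ 2), where pyGet? never returns none
def pvC0 (c : List Int) : Int := (PySem.List.pyGet? c 0).getD 0
def pvC1 (c : List Int) : Int := (PySem.List.pyGet? c 1).getD 0

-- ===== PORT A =====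
def compute_perimeter_py (burning_cells : List (List Int)) : List (List Int) :=
  if burning_cells = [] then []
  else
    let xs := burning_cells.map pvC0
    let ys := burning_cells.map pvC1
    let min_x := (PySem.List.min? xs (fun y => y)).getD 0
    let max_x := (PySem.List.max? xs (fun y => y)).getD 0
    -- min_y, max_y are computed by the Python but never used
    let _min_y := (PySem.List.min? ys (fun y => y)).getD 0
    let _max_y := (PySem.List.max? ys (fun y => y)).getD 0
    let tb := (PySem.List.pyRange min_x (max_x + 1) 1).foldl
      (fun (tb : List (List Int) × List (List Int)) x =>
        let ys_at_x := (burning_cells.filter (fun c => pvC0 c == x)).map pvC1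
        if ys_at_x ≠ [] then
          (tb.1 ++ [[x, (PySem.List.min? ys_at_x (fun y => y)).getD 0]],
           tb.2 ++ [[x, (PySem.List.max? ys_at_x (fun y => y)).getD 0]])
        else tb) ([], [])
    let perimeter := tb.1 ++ tb.2.reverse
    if perimeter ≠ [] ∧ PySem.List.pyGet? perimeter 0 ≠ PySem.List.pyGet? perimeter (-1) then
      perimeter ++ [(PySem.List.pyGet? perimeter 0).getD []]
    else perimeter

-- ===== PORT B =====
-- the outer while loop of Source B: take the run of points sharing the head's x
-- (inner while loop = running min/max over that run), emit one top and one bottom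
-- vertex, continue after the run
def pvScan : List (Int × Int) → List (List Int) × List (List Int)
  | [] => ([], [])
  | (x, y) :: t =>
    let grp := t.takeWhile (fun p => p.1 == x)
    let rest := t.dropWhile (fun p => p.1 == x)
    let lo := grp.foldl (fun a p => min a p.2) y
    let hi := grp.foldl (fun a p => max a p.2) y
    let tb := pvScan rest
    ([x, lo] :: tb.1, [x, hi] :: tb.2)
termination_by pts => pts.length
decreasing_by
  simp only [List.length_cons]
  exact Nat.lt_succ_of_le (List.length_dropWhile_le _ _)

def compute_perimeter_py_alt (burning_cells : List (List Int)) : List (List Int) :=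
  if burning_cells = [] then []
  else
    let pts := PySem.List.sorted (burning_cells.map (fun c => (pvC0 c, pvC1 c))) (fun p => p.1)
    let tb := pvScan pts
    let perimeter := tb.1 ++ tb.2.reverse
    if PySem.List.pyGet? perimeter 0 ≠ PySem.List.pyGet? perimeter (-1) then
      perimeter ++ [(PySem.List.pyGet? perimeter 0).getD []]
    else perimeter

-- ===== PRECONDITION & SPEC =====
-- Pre_ excludes cells shorter than 2 elements, on which the Python A raises IndexError (c[0]/c[1]).
def Pre_compute_perimeter_py (burning_cells : List (List Int)) : Prop :=
  ∀ c ∈ burning_cells, 2 ≤ c.length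
instance (burning_cells : List (List Int)) : Decidable (Pre_compute_perimeter_py burning_cells) := by unfold Pre_compute_perimeter_py; infer_instance
def pvWitness_compute_perimeter_py : List (List Int) := [[1, 2], [1, 4], [3, 0]]
def Spec_compute_perimeter_py (burning_cells : List (List Int)) (out : List (List Int)) : Prop := out = compute_perimeter_py_alt burning_cells
instance (burning_cells : List (List Int)) (out : List (List Int)) : Decidable (Spec_compute_perimeter_py burning_cells out) := by unfold Spec_compute_perimeter_py; infer_instance

-- ===== CLAIM (what is proved, stated in full; the proofs are below) =====
def Claim_equal_compute_perimeter_py : Prop := ∀ (burning_cells : List (List Int)), Dom_compute_perimeter_py burning_cells → Pre_compute_perimeter_py burning_cells → Spec_compute_perimeter_py burning_cells (compute_perimeter_py burning_cells)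

-- ===== LEMMAS AND PROOFS =====

-- min(l) / max(l) with Python's default-less getD 0 as both ports compute them
def pvMinD (l : List Int) : Int := (PySem.List.min? l (fun y => y)).getD 0
def pvMaxD (l : List Int) : Int := (PySem.List.max? l (fun y => y)).getD 0

theorem pvMinD_perm {l l' : List Int} (h : l.Perm l') : pvMinD l = pvMinD l' := by
  unfold pvMinD
  cases hl : PySem.List.min? l (fun y => y) with
  | none =>
    rw [PySem.List.min?_eq_none_iff] at hl; subst hl
    rw [← h.nil_eq, (PySem.List.min?_eq_none_iff ([] : List Int) (fun y => y)).mpr rfl]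
  | some m =>
    cases hl' : PySem.List.min? l' (fun y => y) with
    | none =>
      rw [PySem.List.min?_eq_none_iff] at hl'; subst hl'
      rw [List.Perm.eq_nil h, (PySem.List.min?_eq_none_iff ([] : List Int) (fun y => y)).mpr rfl] at hl
      exact (Option.some_ne_none _ hl.symm).elim
    | some m' =>
      simp only [Option.getD_some]
      have hm := PySem.List.min?_mem hl
      have hm' := PySem.List.min?_mem hl'
      exact le_antisymm (PySem.List.min?_isMin hl m' (h.mem_iff.mpr hm'))
        (PySem.List.min?_isMin hl' m (h.mem_iff.mp hm))

theorem pvMaxD_perm {l l' : List Int} (h : l.Perm l') : pvMaxD l = pvMaxD l' := by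
  unfold pvMaxD
  cases hl : PySem.List.max? l (fun y => y) with
  | none =>
    rw [PySem.List.max?_eq_none_iff] at hl; subst hl
    rw [← h.nil_eq, (PySem.List.max?_eq_none_iff ([] : List Int) (fun y => y)).mpr rfl]
  | some m =>
    cases hl' : PySem.List.max? l' (fun y => y) with
    | none =>
      rw [PySem.List.max?_eq_none_iff] at hl'; subst hl'
      rw [List.Perm.eq_nil h, (PySem.List.max?_eq_none_iff ([] : List Int) (fun y => y)).mpr rfl] at hl
      exact (Option.some_ne_none _ hl.symm).elim
    | some m' =>
      simp only [Option.getD_some]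
      have hm := PySem.List.max?_mem hl
      have hm' := PySem.List.max?_mem hl'
      exact le_antisymm (PySem.List.max?_isMax hl' m (h.mem_iff.mp hm))
        (PySem.List.max?_isMax hl m' (h.mem_iff.mpr hm'))

-- running min/max over a run whose elements all share the head's value equals min?/max? of the run
theorem pv_foldl_min_eq (y : Int) (l : List Int) :
    l.foldl min y = pvMinD (y :: l) := by
  unfold pvMinD
  rw [PySem.List.min?_id_cons]; rfl

theorem pv_foldl_max_eq (y : Int) (l : List Int) :
    l.foldl max y = pvMaxD (y :: l) := by
  unfold pvMaxD
  rw [PySem.List.max?_id_cons]; rfl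

-- characterisation of the sweep: on a list whose x's are nondecreasing it produces, for some
-- strictly increasing list D' with the same x-membership, the min-y / max-y vertex per x
theorem pvScan_spec (pts : List (Int × Int))
    (hs : (pts.map Prod.fst).Pairwise (· ≤ ·)) :
    ∃ D' : List Int,
      pvScan pts
        = (D'.map (fun x => [x, pvMinD ((pts.filter (fun p => p.1 == x)).map Prod.snd)]),
           D'.map (fun x => [x, pvMaxD ((pts.filter (fun p => p.1 == x)).map Prod.snd)]))
      ∧ D'.Pairwise (· < ·) ∧ (∀ z, z ∈ D' ↔ z ∈ pts.map Prod.fst) := by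
  suffices H : ∀ (n : Nat) (pts : List (Int × Int)), pts.length ≤ n →
      (pts.map Prod.fst).Pairwise (· ≤ ·) →
      ∃ D' : List Int,
        pvScan pts
          = (D'.map (fun x => [x, pvMinD ((pts.filter (fun p => p.1 == x)).map Prod.snd)]),
             D'.map (fun x => [x, pvMaxD ((pts.filter (fun p => p.1 == x)).map Prod.snd)]))
        ∧ D'.Pairwise (· < ·) ∧ (∀ z, z ∈ D' ↔ z ∈ pts.map Prod.fst) by
    exact H pts.length pts le_rfl hs
  intro n
  induction n with
  | zero =>
    intro pts hlen _
    have hnil : pts = [] := List.length_eq_zero_iff.mp (Nat.le_zero.mp hlen)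
    subst hnil
    exact ⟨[], by simp [pvScan], List.Pairwise.nil, by simp⟩
  | succ n ih =>
    intro pts hlen hs
    match pts with
    | [] => exact ⟨[], by simp [pvScan], List.Pairwise.nil, by simp⟩
    | (x, y) :: t =>
      -- split the sortedness hypothesis
      rw [List.map_cons, List.pairwise_cons] at hs
      obtain ⟨hx, ht⟩ := hs
      set p : Int × Int → Bool := fun q => q.1 == x with hp
      set grp := t.takeWhile p with hgrp
      set rest := t.dropWhile p with hrest
      have hsplit : grp ++ rest = t := List.takeWhile_append_dropWhile
      -- every element of grp has first component x
      have hgx : ∀ q ∈ grp, q.1 = x := fun q hq => by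
        have := List.mem_takeWhile_imp hq
        simpa [hp] using this
      -- every element of rest has first component > x
      have hrx : ∀ q ∈ rest, x < q.1 := by
        intro q hq
        have hle : x ≤ q.1 := by
          apply hx
          have : q ∈ t := (List.dropWhile_sublist p).mem hq
          exact List.mem_map_of_mem this
        rcases List.mem_iff_append.mp hq with ⟨pre, suf, hqs⟩
        cases hhead : rest.head? with
        | none => simp [List.head?_eq_none_iff.mp hhead] at hq
        | some r0 =>
          have hr0 : p r0 = false := by
            have := List.head?_dropWhile_not p t
            rw [← hrest, hhead] at this
            exact this
          rcases List.head?_eq_some_iff.mp hhead with ⟨r', hr'⟩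
          have hr0le : r0.1 ≤ q.1 := by
            rcases (List.mem_cons.mp (hr' ▸ hq)) with h | h
            · exact h ▸ le_refl _
            · have hpw : (rest.map Prod.fst).Pairwise (· ≤ ·) :=
                List.Pairwise.sublist ((List.dropWhile_sublist p).map Prod.fst) ht
              rw [hr', List.map_cons, List.pairwise_cons] at hpw
              exact hpw.1 _ (List.mem_map_of_mem h)
          have hr0x : x ≤ r0.1 := by
            apply hx
            apply List.mem_map_of_mem
            apply (List.dropWhile_sublist p).mem
            rw [← hrest, hr']
            exact List.mem_cons_self
          have : r0.1 ≠ x := by simpa [hp] using hr0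
          omega
      -- the filter at x is the head run
      have hfx : ((x, y) :: t).filter p = (x, y) :: grp := by
        have h1 : grp.filter p = grp := List.filter_eq_self.mpr (fun q hq => by simp [hp, hgx q hq])
        have h2 : rest.filter p = [] := List.filter_eq_nil_iff.mpr
          (fun q hq => by simp [hp]; exact ne_of_gt (hrx q hq))
        have h0 : p (x, y) = true := by simp [hp]
        rw [← hsplit, List.filter_cons, List.filter_append, h1, h2, if_pos h0, List.append_nil]
      -- at any other z the filter skips the head run
      have hfz : ∀ z : Int, z ≠ x →
          ((x, y) :: t).filter (fun q => q.1 == z) = rest.filter (fun q => q.1 == z) := by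
        intro z hz
        have h1 : grp.filter (fun q => q.1 == z) = [] := List.filter_eq_nil_iff.mpr
          (fun q hq => by simp [hgx q hq]; exact fun h => hz h.symm)
        have hxz : (x == z) = false := by simp; exact fun h => hz h.symm
        rw [← hsplit, List.filter_cons, List.filter_append, h1]
        simp [hxz]
      -- induction hypothesis on rest
      have hrlen : rest.length ≤ n := by
        have h1 : rest.length ≤ t.length := List.length_dropWhile_le p t
        simp at hlen; omega
      have hrpw : (rest.map Prod.fst).Pairwise (· ≤ ·) :=
        List.Pairwise.sublist ((List.dropWhile_sublist p).map Prod.fst) ht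
      obtain ⟨D0, hscan0, hD0lt, hD0mem⟩ := ih rest hrlen hrpw
      refine ⟨x :: D0, ?_, ?_, ?_⟩
      · -- the scan equation
        rw [pvScan]
        simp only [← hgrp, ← hrest, ← hp, hscan0]
        have hmin : grp.foldl (fun a q => min a q.2) y
            = pvMinD ((((x, y) :: t).filter p).map Prod.snd) := by
          rw [hfx, List.map_cons, ← pv_foldl_min_eq, List.foldl_map]
        have hmax : grp.foldl (fun a q => max a q.2) y
            = pvMaxD ((((x, y) :: t).filter p).map Prod.snd) := by
          rw [hfx, List.map_cons, ← pv_foldl_max_eq, List.foldl_map]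
        have hcongr1 : D0.map (fun z => [z, pvMinD ((rest.filter (fun q => q.1 == z)).map Prod.snd)])
            = D0.map (fun z => [z, pvMinD ((((x, y) :: t).filter (fun q => q.1 == z)).map Prod.snd)]) := by
          apply List.map_congr_left
          intro z hz
          have hzx : z ≠ x := ne_of_gt (by
            rcases List.mem_map.mp ((hD0mem z).mp hz) with ⟨q, hq, hqz⟩
            exact hqz ▸ hrx q hq)
          rw [hfz z hzx]
        have hcongr2 : D0.map (fun z => [z, pvMaxD ((rest.filter (fun q => q.1 == z)).map Prod.snd)])
            = D0.map (fun z => [z, pvMaxD ((((x, y) :: t).filter (fun q => q.1 == z)).map Prod.snd)]) := by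
          apply List.map_congr_left
          intro z hz
          have hzx : z ≠ x := ne_of_gt (by
            rcases List.mem_map.mp ((hD0mem z).mp hz) with ⟨q, hq, hqz⟩
            exact hqz ▸ hrx q hq)
          rw [hfz z hzx]
        rw [List.map_cons, List.map_cons, ← hmin, ← hmax, ← hcongr1, ← hcongr2]
      · -- strictly increasing
        rw [List.pairwise_cons]
        refine ⟨?_, hD0lt⟩
        intro z hz
        rcases List.mem_map.mp ((hD0mem z).mp hz) with ⟨q, hq, hqz⟩
        exact hqz ▸ hrx q hq
      · -- membership
        intro z
        simp only [List.mem_cons, hD0mem, List.map_cons]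
        constructor
        · rintro (rfl | hz)
          · exact Or.inl rfl
          · exact Or.inr (List.Sublist.mem hz ((List.dropWhile_sublist p).map Prod.fst))
        · rintro (rfl | hz)
          · exact Or.inl rfl
          · rcases List.mem_map.mp hz with ⟨q, hq, hqz⟩
            rw [← hsplit] at hq
            rcases List.mem_append.mp hq with hq | hq
            · exact Or.inl (by rw [← hqz]; exact hgx q hq)
            · exact Or.inr (hqz ▸ List.mem_map_of_mem hq)

-- A's loop with its two appended accumulators, in closed form
theorem pv_foldl_pair (p : Int → Prop) [DecidablePred p] (fmin fmax : Int → List Int) :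
    ∀ (l : List Int) (acc1 acc2 : List (List Int)),
      l.foldl (fun (tb : List (List Int) × List (List Int)) x =>
          (if p x then tb.1 ++ [fmin x] else tb.1,
           if p x then tb.2 ++ [fmax x] else tb.2)) (acc1, acc2)
        = (acc1 ++ (l.filter (fun x => decide (p x))).map fmin,
           acc2 ++ (l.filter (fun x => decide (p x))).map fmax)
  | [], acc1, acc2 => by simp
  | x :: l, acc1, acc2 => by
    by_cases h : p x
    · simp only [List.foldl_cons, if_pos h, List.filter_cons, decide_eq_true h]
      rw [pv_foldl_pair p fmin fmax l]
      simp
    · simp only [List.foldl_cons, if_neg h, List.filter_cons, decide_eq_false h,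
        Bool.false_eq_true, if_false]
      rw [pv_foldl_pair p fmin fmax l]

-- the x-columns list both ports enumerate: strictly increasing, same membership, hence equal
theorem pv_cols_eq (R D' : List Int) (hR : R.Pairwise (· < ·)) (hD : D'.Pairwise (· < ·))
    (hmem : ∀ z, z ∈ R ↔ z ∈ D') : R = D' := by
  have h1 : PySem.List.sorted R (fun z => z) = D' :=
    PySem.List.sorted_eq_of_perm_of_pairwise_lt R D' (fun z => z)
      ((List.perm_ext_iff_of_nodup
        (hD.imp ne_of_lt) (hR.imp ne_of_lt)).mpr (fun z => (hmem z).symm)) hD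
  have h2 : PySem.List.sorted R (fun z => z) = R :=
    PySem.List.sorted_eq_of_perm_of_pairwise_lt R R (fun z => z) (List.Perm.refl R) hR
  rw [← h1, h2]

theorem pv_main (bc : List (List Int)) :
    compute_perimeter_py bc = compute_perimeter_py_alt bc := by
  by_cases hb : bc = []
  · simp [compute_perimeter_py, compute_perimeter_py_alt, hb]
  · unfold compute_perimeter_py compute_perimeter_py_alt
    simp only [if_neg hb]
    set pairs := bc.map (fun c => (pvC0 c, pvC1 c)) with hpairs
    set pts := PySem.List.sorted pairs (fun p => p.1) with hpts
    have hperm : pts.Perm pairs := PySem.List.sorted_perm pairs (fun p => p.1) false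
    have hfsts : pairs.map Prod.fst = bc.map pvC0 := by
      rw [hpairs, List.map_map]; rfl
    have hsorted : (pts.map Prod.fst).Pairwise (· ≤ ·) := by
      rw [List.pairwise_map]
      exact PySem.List.sorted_pairwise pairs (fun p => p.1)
    obtain ⟨D', hscan, hDlt, hDmem⟩ := pvScan_spec pts hsorted
    set min_x := (PySem.List.min? (bc.map pvC0) (fun y => y)).getD 0 with hminx
    set max_x := (PySem.List.max? (bc.map pvC0) (fun y => y)).getD 0 with hmaxx
    -- A's loop body splits into two independent accumulators
    have hstep : ∀ (tb : List (List Int) × List (List Int)) (x : Int),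
        x ∈ PySem.List.pyRange min_x (max_x + 1) 1 →
        (if (List.map pvC1 (List.filter (fun c => pvC0 c == x) bc)) ≠ [] then
           (tb.1 ++ [[x, (PySem.List.min? (List.map pvC1 (List.filter (fun c => pvC0 c == x) bc)) (fun y => y)).getD 0]],
            tb.2 ++ [[x, (PySem.List.max? (List.map pvC1 (List.filter (fun c => pvC0 c == x) bc)) (fun y => y)).getD 0]])
         else tb)
        = (if (List.map pvC1 (List.filter (fun c => pvC0 c == x) bc)) ≠ [] then tb.1 ++ [[x, pvMinD (List.map pvC1 (List.filter (fun c => pvC0 c == x) bc))]] else tb.1,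
           if (List.map pvC1 (List.filter (fun c => pvC0 c == x) bc)) ≠ [] then tb.2 ++ [[x, pvMaxD (List.map pvC1 (List.filter (fun c => pvC0 c == x) bc))]] else tb.2) := by
      intro tb x _
      by_cases h : (List.map pvC1 (List.filter (fun c => pvC0 c == x) bc)) ≠ [] <;> simp [h, pvMinD, pvMaxD]
    set R := (PySem.List.pyRange min_x (max_x + 1) 1).filter
      (fun x => decide ((List.map pvC1 (List.filter (fun c => pvC0 c == x) bc)) ≠ [])) with hRdef
    have hA : (PySem.List.pyRange min_x (max_x + 1) 1).foldl
        (fun (tb : List (List Int) × List (List Int)) x =>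
          if (List.map pvC1 (List.filter (fun c => pvC0 c == x) bc)) ≠ [] then
            (tb.1 ++ [[x, (PySem.List.min? (List.map pvC1 (List.filter (fun c => pvC0 c == x) bc)) (fun y => y)).getD 0]],
             tb.2 ++ [[x, (PySem.List.max? (List.map pvC1 (List.filter (fun c => pvC0 c == x) bc)) (fun y => y)).getD 0]])
          else tb) ([], [])
        = (R.map (fun x => [x, pvMinD (List.map pvC1 (List.filter (fun c => pvC0 c == x) bc))]), R.map (fun x => [x, pvMaxD (List.map pvC1 (List.filter (fun c => pvC0 c == x) bc))])) := by
      refine (PySem.List.foldl_congr_mem _ _ _ _ hstep).trans ?_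
      rw [pv_foldl_pair (fun x => (List.map pvC1 (List.filter (fun c => pvC0 c == x) bc)) ≠ [])
            (fun x => [x, pvMinD (List.map pvC1 (List.filter (fun c => pvC0 c == x) bc))]) (fun x => [x, pvMaxD (List.map pvC1 (List.filter (fun c => pvC0 c == x) bc))])]
      simp [hRdef]
    rw [hA]
    -- a column is nonempty exactly when some cell lives at that x
    have hysmem : ∀ z : Int, (List.map pvC1 (List.filter (fun c => pvC0 c == z) bc)) ≠ [] ↔ z ∈ bc.map pvC0 := by
      intro z
      constructor
      · intro h
        rcases List.exists_mem_of_ne_nil _ h with ⟨v, hv⟩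
        rcases List.mem_map.mp hv with ⟨c, hc, _⟩
        rcases List.mem_filter.mp hc with ⟨hcbc, hcz⟩
        exact List.mem_map.mpr ⟨c, hcbc, by simpa using hcz⟩
      · intro h hnil
        rcases List.mem_map.mp h with ⟨c, hc, hcz⟩
        have hcf : c ∈ bc.filter (fun c => pvC0 c == z) :=
          List.mem_filter.mpr ⟨hc, by simp [hcz]⟩
        simp only [List.map_eq_nil_iff] at hnil
        rw [hnil] at hcf
        exact absurd hcf List.not_mem_nil
    have hbcne : bc.map pvC0 ≠ [] := by simpa using hb
    -- every present x lies between min_x and max_x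
    have hbounds : ∀ z ∈ bc.map pvC0, min_x ≤ z ∧ z ≤ max_x := by
      intro z hz
      cases hmn : PySem.List.min? (bc.map pvC0) (fun y => y) with
      | none => exact absurd ((PySem.List.min?_eq_none_iff _ _).mp hmn) hbcne
      | some m =>
        cases hmx : PySem.List.max? (bc.map pvC0) (fun y => y) with
        | none => exact absurd ((PySem.List.max?_eq_none_iff _ _).mp hmx) hbcne
        | some M =>
          constructor
          · rw [hminx, hmn]; simpa using PySem.List.min?_isMin hmn z hz
          · rw [hmaxx, hmx]; simpa using PySem.List.max?_isMax hmx z hz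
    have hmemRD : ∀ z, z ∈ R ↔ z ∈ D' := by
      intro z
      rw [hRdef]
      simp only [List.mem_filter, PySem.List.mem_pyRange_one, decide_eq_true_eq]
      rw [hysmem z, hDmem z]
      constructor
      · rintro ⟨_, hzx⟩
        rw [← hfsts] at hzx
        exact ((hperm.map Prod.fst).mem_iff).mpr hzx
      · intro hz
        have hz' : z ∈ bc.map pvC0 := by
          rw [← hfsts]; exact ((hperm.map Prod.fst).mem_iff).mp hz
        obtain ⟨h1, h2⟩ := hbounds z hz'
        exact ⟨⟨h1, by omega⟩, hz'⟩
    have hRD : R = D' :=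
      pv_cols_eq R D'
        (List.Pairwise.filter _ (PySem.List.pairwise_lt_pyRange_one _ _)) hDlt hmemRD
    -- B's per-column snd-list is a permutation of A's, so their min/max agree
    have hfilt : ∀ z : Int, ((pts.filter (fun q => q.1 == z)).map Prod.snd).Perm (List.map pvC1 (List.filter (fun c => pvC0 c == z) bc)) := by
      intro z
      have h2 : (pairs.filter (fun q => q.1 == z)).map Prod.snd = (List.map pvC1 (List.filter (fun c => pvC0 c == z) bc)) := by
        rw [hpairs, List.filter_map, List.map_map]
        rfl
      rw [← h2]
      exact (hperm.filter _).map _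
    have hmapmin :
        D'.map (fun x => [x, pvMinD ((pts.filter (fun p => p.1 == x)).map Prod.snd)])
          = D'.map (fun x => [x, pvMinD (List.map pvC1 (List.filter (fun c => pvC0 c == x) bc))]) :=
      List.map_congr_left (fun z _ => by rw [pvMinD_perm (hfilt z)])
    have hmapmax :
        D'.map (fun x => [x, pvMaxD ((pts.filter (fun p => p.1 == x)).map Prod.snd)])
          = D'.map (fun x => [x, pvMaxD (List.map pvC1 (List.filter (fun c => pvC0 c == x) bc))]) :=
      List.map_congr_left (fun z _ => by rw [pvMaxD_perm (hfilt z)])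
    rw [hscan, hmapmin, hmapmax, hRD]
    -- the perimeter is nonempty, so A's extra emptiness test is vacuous
    have hPne : D'.map (fun x => [x, pvMinD (List.map pvC1 (List.filter (fun c => pvC0 c == x) bc))])
        ++ (D'.map (fun x => [x, pvMaxD (List.map pvC1 (List.filter (fun c => pvC0 c == x) bc))])).reverse ≠ [] := by
      have hD'ne : D' ≠ [] := by
        rcases List.exists_mem_of_ne_nil bc hb with ⟨c, hc⟩
        apply List.ne_nil_of_mem (a := pvC0 c)
        rw [hDmem]
        exact ((hperm.map Prod.fst).mem_iff).mpr
          (by rw [hfsts]; exact List.mem_map_of_mem hc)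
      simp [hD'ne]
    rw [if_congr (and_iff_right hPne) rfl rfl]

-- ===== VERDICT (by name: the statement is the Claim_ definition above) =====
theorem compute_perimeter_py_spec : Claim_equal_compute_perimeter_py := by
  intro bc _ _
  unfold Spec_compute_perimeter_py
  exact pv_main bc
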